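-- pv_equiv track=rewrite | github.com/miliar/Code_Jam_Webscraper | Solutions_python/Problem_200/3197.py | isTidy
-- ===== SOURCE A (Python) =====
-- def isTidy(num):
--     l = list(str(num))
--
--     if len(l) == 1:
--         return True
--
--     for i in range(0, len(l)-1):
--         if l[i] > l[i+1]:
--             return False
--
--     return True
-- ===== SOURCE B (Python) =====
-- def isTidy(num):
--     s = str(num)
--     return s == ''.join(sorted(s))
-- ===== Notes on version B (the rewrite author's own statement) =====
-- stated objective: idiomatic
-- what changed: Replaces the explicit index loop comparing adjacent characters with a sort-then-compare: the digit string is non-decreasing iff it equals its sorted form.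
import Mathlib
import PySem

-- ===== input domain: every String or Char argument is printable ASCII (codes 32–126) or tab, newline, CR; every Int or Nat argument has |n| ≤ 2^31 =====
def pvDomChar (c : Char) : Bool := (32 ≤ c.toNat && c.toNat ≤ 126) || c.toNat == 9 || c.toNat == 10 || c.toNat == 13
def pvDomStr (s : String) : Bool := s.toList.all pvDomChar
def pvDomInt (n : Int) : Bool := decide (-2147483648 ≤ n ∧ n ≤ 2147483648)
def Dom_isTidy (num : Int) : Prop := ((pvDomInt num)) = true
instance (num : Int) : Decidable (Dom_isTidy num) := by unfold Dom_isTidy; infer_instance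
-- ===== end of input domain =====

-- B replaces the adjacent-comparison index loop with a sort-then-compare (idiomatic alternative, not faster).

-- ===== PORT A =====
-- the 'for i in range(0, len(l)-1): if l[i] > l[i+1]: return False' loop
def isTidyLoop (l : List Char) : List Int → Bool
  | [] => true
  | i :: is =>
    if PySem.List.pyGetD l i ' ' > PySem.List.pyGetD l (i + 1) ' ' then false
    else isTidyLoop l is

def isTidy (num : Int) : Bool :=
  let l := PySem.Int.toChars num
  if l.length == 1 then true
  else isTidyLoop l (PySem.List.pyRange 0 ((l.length : Int) - 1) 1)

-- ===== PORT B =====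
def isTidy_alt (num : Int) : Bool :=
  let s := PySem.Int.toChars num
  decide (s = PySem.List.sorted s (fun c => c) false)

-- ===== PRECONDITION & SPEC =====
def Spec_isTidy (num : Int) (out : Bool) : Prop := out = isTidy_alt num
instance (num : Int) (out : Bool) : Decidable (Spec_isTidy num out) := by unfold Spec_isTidy; infer_instance

-- ===== CLAIM (what is proved, stated in full; the proofs are below) =====
def Claim_equal_isTidy : Prop := ∀ (num : Int), Dom_isTidy num → Spec_isTidy num (isTidy num)

-- ===== LEMMAS AND PROOFS =====

theorem isTidyLoop_true_iff (l : List Char) (is : List Int) :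
    isTidyLoop l is = true ↔
      ∀ i ∈ is, ¬ (PySem.List.pyGetD l i ' ' > PySem.List.pyGetD l (i + 1) ' ') := by
  induction is with
  | nil => simp [isTidyLoop]
  | cons i is ih =>
    simp only [isTidyLoop]
    split_ifs with h
    · simp [h]
    · rw [ih]
      constructor
      · intro ha j hj
        rcases List.mem_cons.mp hj with rfl | hm
        · exact h
        · exact ha j hm
      · intro ha j hj
        exact ha j (List.mem_cons_of_mem _ hj)

theorem isTidy_true_iff_pairwise (l : List Char) :
    (isTidyLoop l (PySem.List.pyRange 0 ((l.length : Int) - 1) 1) = true) ↔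
      l.Pairwise (· ≤ ·) := by
  rw [isTidyLoop_true_iff, ← List.isChain_iff_pairwise, List.isChain_iff_getElem]
  constructor
  · intro h i hi
    have hm : ((i : Int)) ∈ PySem.List.pyRange 0 ((l.length : Int) - 1) 1 := by
      rw [PySem.List.mem_pyRange_one]; omega
    have := h _ hm
    rw [PySem.List.pyGetD_natCast] at this
    have h2 : ((i : Int) + 1) = ((i + 1 : Nat) : Int) := by push_cast; ring
    rw [h2, PySem.List.pyGetD_natCast] at this
    simp only [List.getD_eq_getElem?_getD, List.getElem?_eq_getElem (by omega : i < l.length),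
      List.getElem?_eq_getElem hi] at this
    simpa using not_lt.mp this
  · intro h i hm
    rw [PySem.List.mem_pyRange_one] at hm
    obtain ⟨n, rfl⟩ := Int.eq_ofNat_of_zero_le hm.1
    have hn : n + 1 < l.length := by omega
    have := h n hn
    rw [PySem.List.pyGetD_natCast]
    have h2 : ((n : Int) + 1) = ((n + 1 : Nat) : Int) := by push_cast; ring
    rw [h2, PySem.List.pyGetD_natCast]
    simp only [List.getD_eq_getElem?_getD, List.getElem?_eq_getElem (by omega : n < l.length),
      List.getElem?_eq_getElem hn]
    simpa using not_lt.mpr this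

theorem pairwise_iff_eq_sorted (l : List Char) :
    l.Pairwise (· ≤ ·) ↔ l = PySem.List.sorted l (fun c => c) false := by
  constructor
  · intro h
    exact (PySem.List.sorted_eq_self_of_pairwise l (fun c => c) (by simpa using h)).symm
  · intro h
    have := PySem.List.sorted_pairwise l (fun c : Char => c)
    rw [← h] at this
    simpa using this

-- both ports, as one statement about an arbitrary character list
theorem ports_agree (l : List Char) :
    (if l.length == 1 then true
     else isTidyLoop l (PySem.List.pyRange 0 ((l.length : Int) - 1) 1)) =
      decide (l = PySem.List.sorted l (fun c => c) false) := by
  split_ifs with h1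
  · match l, h1 with
    | [c], _ =>
      have : ([c] : List Char).Pairwise (· ≤ ·) := by simp
      simp [← pairwise_iff_eq_sorted [c], this]
  · rw [Bool.eq_iff_iff]
    rw [isTidy_true_iff_pairwise, pairwise_iff_eq_sorted]
    simp

-- ===== VERDICT (by name: the statement is the Claim_ definition above) =====
theorem isTidy_spec : Claim_equal_isTidy := by
  intro num _
  unfold Spec_isTidy isTidy isTidy_alt
  exact ports_agree (PySem.Int.toChars num)
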